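-- pv_equiv track=rewrite | github.com/AlexJoaquimPereira/Artificial-Intelligence-Lab-SEM6 | Experiment 2/dfs1.py | dfs
-- ===== SOURCE A (Python) =====
-- def dfs(graph, start_node, visited: set):
--     """
--     Depth First Search (DFS)
--     graph: dictionary
--     start_node: starting node of the graph
--     visited: set to keep track of visited nodes
--     """
--     stack = [start_node]  # Initialize stack with the start node
--     path = ''  # To store the traversal path
--
--     while stack:
--         current_node = stack.pop()
--         if current_node not in visited:
--             visited.add(current_node)  # Mark the node as visited
--             path += current_node + " -> "  # Add the node to the path
--
--             for neighbor in reversed(graph.get(current_node, [])):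
--                 if neighbor not in visited:
--                     stack.append(neighbor)
--
--     return path[:-4] if path else "No nodes visited"
-- ===== SOURCE B (Python) =====
-- def dfs(graph, start_node, visited: set):
--     """Recursive DFS: same visit order as the iterative reversed-push stack version."""
--     if start_node in visited:
--         return "No nodes visited"
--     path = ''
--
--     def rec(node):
--         nonlocal path
--         visited.add(node)
--         path += node + " -> "
--         for neighbor in graph.get(node, []):
--             if neighbor not in visited:
--                 rec(neighbor)
--
--     rec(start_node)
--     return path[:-4]
-- ===== Notes on version B (the rewrite author's own statement) =====
-- stated objective: alternative
-- what changed: Replaces the explicit stack loop with reversed-neighbor pushes and pop-time visited checks by a recursive DFS helper that visits a node, appends it to the path, and recurses into not-yet-visited neighbors in forward order; the start-in-visited guard is handled up front.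
import Mathlib
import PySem

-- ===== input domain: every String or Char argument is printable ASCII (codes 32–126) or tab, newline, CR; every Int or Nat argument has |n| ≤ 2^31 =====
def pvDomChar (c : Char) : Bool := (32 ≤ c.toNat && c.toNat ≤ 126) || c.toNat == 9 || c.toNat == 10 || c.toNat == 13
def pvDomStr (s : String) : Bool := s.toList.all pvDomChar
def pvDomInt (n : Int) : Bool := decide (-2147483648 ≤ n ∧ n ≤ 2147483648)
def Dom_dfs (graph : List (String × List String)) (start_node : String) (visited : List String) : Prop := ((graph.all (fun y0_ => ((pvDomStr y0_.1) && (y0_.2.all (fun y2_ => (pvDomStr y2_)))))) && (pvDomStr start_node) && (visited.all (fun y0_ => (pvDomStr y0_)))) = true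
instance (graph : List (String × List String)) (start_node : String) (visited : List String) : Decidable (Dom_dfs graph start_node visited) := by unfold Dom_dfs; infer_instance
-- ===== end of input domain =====

-- B replaces A's explicit stack loop by a recursive DFS over forward-order neighbors (same return
-- value; like A, the Python B mutates the caller's `visited` set — the equivalence is about the
-- return value, and the final visited sets coincide as well, though that is not claimed here).

-- termination infrastructure, cited by the ports' decreasing_by
def pvNodes (graph : List (String × List String)) : Finset String :=
  (graph.flatMap (fun kv => kv.1 :: kv.2)).toFinset

def pvRem (graph : List (String × List String)) (v : List String) : Nat :=
  ((pvNodes graph).filter (fun x => x ∉ v)).card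

theorem pvRem_le (graph : List (String × List String)) {v v' : List String}
    (hsub : ∀ x, x ∈ v → x ∈ v') : pvRem graph v' ≤ pvRem graph v := by
  apply Finset.card_le_card
  intro x hx
  simp only [Finset.mem_filter] at hx ⊢
  exact ⟨hx.1, fun hxv => hx.2 (hsub x hxv)⟩

theorem pvRem_lt (graph : List (String × List String)) {v v' : List String} {cur : String}
    (hU : cur ∈ pvNodes graph) (hv : cur ∉ v)
    (hsub : ∀ x, x ∈ v → x ∈ v') (hcur : cur ∈ v') : pvRem graph v' < pvRem graph v := by
  apply Finset.card_lt_card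
  rw [Finset.ssubset_iff_of_subset]
  · exact ⟨cur, by simp [Finset.mem_filter, hU, hv, hcur]⟩
  · intro x hx
    simp only [Finset.mem_filter] at hx ⊢
    exact ⟨hx.1, fun hxv => hx.2 (hsub x hxv)⟩

theorem pvRem_add_eq (graph : List (String × List String)) {cur : String}
    (hU : cur ∉ pvNodes graph) (v : List String) :
    pvRem graph (PySem.Set.add v cur) = pvRem graph v := by
  unfold pvRem
  congr 1
  apply Finset.filter_congr
  intro x hx
  have hne : x ≠ cur := fun h => hU (h ▸ hx)
  simp [PySem.Set.mem_add, hne]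

theorem pvGetD_nil_of_not_mem (graph : List (String × List String)) {cur : String}
    (hU : cur ∉ pvNodes graph) :
    PySem.Dict.getD ⟨graph⟩ cur [] = ([] : List String) := by
  apply PySem.Dict.getD_of_not_contains
  by_contra hc
  have hk : cur ∈ (PySem.Dict.mk graph).keys :=
    (PySem.Dict.contains_iff_mem_keys _ _).1 (by simpa using hc)
  apply hU
  simp only [pvNodes, List.mem_toFinset, List.mem_flatMap]
  simp only [PySem.Dict.keys, List.mem_map] at hk
  obtain ⟨kv, hkv, hkeq⟩ := hk
  exact ⟨kv, hkv, by simp [hkeq]⟩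

-- ===== PORT A =====
-- A: iterative DFS with an explicit stack; pop from the end, push unvisited neighbors in reversed
-- order (stack represented top-at-head: pop = head, the reversed pushes prepend the forward list).
def dfsLoop (graph : List (String × List String)) (stack : List String)
    (v : List String) (path : List Char) : List String × List Char :=
  match stack with
  | [] => (v, path)
  | cur :: rest =>
    if h : cur ∈ v then dfsLoop graph rest v path
    else
      let v' := PySem.Set.add v cur
      dfsLoop graph
        (((PySem.Dict.getD ⟨graph⟩ cur []).filter (fun nb => decide (nb ∉ v'))) ++ rest)
        v' (path ++ cur.toList ++ (" -> ").toList)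
  termination_by (pvRem graph v, stack.length)
  decreasing_by
  · exact Prod.Lex.right _ (Nat.lt_succ_self _)
  · rcases Decidable.em (cur ∈ pvNodes graph) with hU | hU
    · exact Prod.Lex.left _ _ (pvRem_lt graph hU h
        (fun x hx => (PySem.Set.mem_add _ _ _).mpr (Or.inl hx)) ((PySem.Set.mem_add _ _ _).mpr (Or.inr rfl)))
    · have h1 : pvRem graph (PySem.Set.add v cur) = pvRem graph v := pvRem_add_eq graph hU v
      have h2 : PySem.Dict.getD ⟨graph⟩ cur [] = ([] : List String) := pvGetD_nil_of_not_mem graph hU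
      rw [h1, h2]
      exact Prod.Lex.right _ (by simp)

def dfs (graph : List (String × List String)) (start_node : String) (visited : List String) : String :=
  let r := dfsLoop graph [start_node] visited []
  if r.2 = [] then "No nodes visited"
  else String.ofList (PySem.Chars.slice r.2 none (some (-4)))

-- ===== PORT B =====
-- B: recursive DFS. `dfsRec node` marks node visited, appends "node -> " to the path, then walks
-- the neighbor list in forward order recursing into each not-yet-visited neighbor (dfsRecList is
-- the for-loop over the neighbors). The subtype carries the invariants used for termination and
-- for the nonemptiness of the produced path; the Python B does not need them.
mutual
def dfsRecList (graph : List (String × List String)) (l : List String)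
    (v : List String) (path : List Char) :
    {r : List String × List Char // (∀ x, x ∈ v → x ∈ r.1) ∧ ∃ t, r.2 = path ++ t} :=
  match l with
  | [] => ⟨(v, path), fun _ hx => hx, [], by simp⟩
  | nb :: rest =>
    if hnb : nb ∈ v then dfsRecList graph rest v path
    else
      let r1 := dfsRec graph nb v path hnb
      let r2 := dfsRecList graph rest r1.val.1 r1.val.2
      ⟨r2.val, fun x hx => r2.property.1 x (r1.property.1 x hx), by
        obtain ⟨t1, h1⟩ := r1.property.2
        obtain ⟨t2, h2⟩ := r2.property.2
        exact ⟨(nb.toList ++ (" -> ").toList ++ t1) ++ t2, by rw [h2, h1]; simp⟩⟩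
  termination_by (pvRem graph v, l.length, 0)
  decreasing_by
  · exact Prod.Lex.right _ (Prod.Lex.left _ _ (Nat.lt_succ_self _))
  · exact Prod.Lex.right _ (Prod.Lex.left _ _ (Nat.succ_pos _))
  · show Prod.Lex (· < ·) (Prod.Lex (· < ·) (· < ·))
      (pvRem graph r1.val.1, rest.length, 0) (pvRem graph v, (nb :: rest).length, 0)
    have hle : pvRem graph r1.val.1 ≤ pvRem graph v := pvRem_le graph r1.property.1
    rcases lt_or_eq_of_le hle with hlt | heq
    · exact Prod.Lex.left _ _ hlt
    · rw [heq]
      exact Prod.Lex.right _ (Prod.Lex.left _ _ (Nat.lt_succ_self _))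

def dfsRec (graph : List (String × List String)) (node : String)
    (v : List String) (path : List Char) (hnode : node ∉ v) :
    {r : List String × List Char //
      (∀ x, x ∈ v → x ∈ r.1) ∧ ∃ t, r.2 = path ++ node.toList ++ (" -> ").toList ++ t} :=
  let v' := PySem.Set.add v node
  let r := dfsRecList graph (PySem.Dict.getD ⟨graph⟩ node []) v' (path ++ node.toList ++ (" -> ").toList)
  ⟨r.val, fun x hx => r.property.1 x ((PySem.Set.mem_add _ _ _).mpr (Or.inl hx)), by
    obtain ⟨t, ht⟩ := r.property.2
    exact ⟨t, ht⟩⟩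
  termination_by (pvRem graph v, 0, 1)
  decreasing_by
  · rcases Decidable.em (node ∈ pvNodes graph) with hU | hU
    · exact Prod.Lex.left _ _ (pvRem_lt graph hU hnode
        (fun x hx => (PySem.Set.mem_add _ _ _).mpr (Or.inl hx)) ((PySem.Set.mem_add _ _ _).mpr (Or.inr rfl)))
    · have h1 : pvRem graph (PySem.Set.add v node) = pvRem graph v := pvRem_add_eq graph hU v
      have h2 : PySem.Dict.getD ⟨graph⟩ node [] = ([] : List String) := pvGetD_nil_of_not_mem graph hU
      rw [h1, h2]
      exact Prod.Lex.right _ (Prod.Lex.right _ Nat.zero_lt_one)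
end

def dfs_alt (graph : List (String × List String)) (start_node : String) (visited : List String) : String :=
  if h : start_node ∈ visited then "No nodes visited"
  else String.ofList (PySem.Chars.slice (dfsRec graph start_node visited [] h).val.2 none (some (-4)))

-- ===== PRECONDITION & SPEC =====
def Spec_dfs (graph : List (String × List String)) (start_node : String) (visited : List String) (out : String) : Prop := out = dfs_alt graph start_node visited
instance (graph : List (String × List String)) (start_node : String) (visited : List String) (out : String) : Decidable (Spec_dfs graph start_node visited out) := by unfold Spec_dfs; infer_instance

-- ===== CLAIM (what is proved, stated in full; the proofs are below) =====
def Claim_equal_dfs : Prop := ∀ (graph : List (String × List String)) (start_node : String) (visited : List String), Dom_dfs graph start_node visited → Spec_dfs graph start_node visited (dfs graph start_node visited)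

-- ===== LEMMAS AND PROOFS =====

-- value-level unfolding equations for B's mutual recursion
theorem recList_nil (graph : List (String × List String)) (v : List String) (path : List Char) :
    (dfsRecList graph [] v path).val = (v, path) := by
  rw [dfsRecList]

theorem recList_cons_of_mem (graph : List (String × List String)) {nb : String} (rest : List String)
    {v : List String} (path : List Char) (hnb : nb ∈ v) :
    (dfsRecList graph (nb :: rest) v path).val = (dfsRecList graph rest v path).val := by
  rw [dfsRecList, dif_pos hnb]

theorem recList_cons_of_not_mem (graph : List (String × List String)) {nb : String} (rest : List String)
    {v : List String} (path : List Char) (hnb : nb ∉ v) :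
    (dfsRecList graph (nb :: rest) v path).val =
      (dfsRecList graph rest (dfsRec graph nb v path hnb).val.1 (dfsRec graph nb v path hnb).val.2).val := by
  rw [dfsRecList, dif_neg hnb]

theorem rec_val (graph : List (String × List String)) (node : String) (v : List String)
    (path : List Char) (h : node ∉ v) :
    (dfsRec graph node v path h).val =
      (dfsRecList graph (PySem.Dict.getD ⟨graph⟩ node [])
        (PySem.Set.add v node) (path ++ node.toList ++ (" -> ").toList)).val := by
  rw [dfsRec]

-- running the neighbor loop over a ++ b = run it over a, then over b from the resulting state
theorem recList_append (graph : List (String × List String)) (a : List String) :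
    ∀ (b : List String) (v : List String) (path : List Char),
    (dfsRecList graph (a ++ b) v path).val =
      (dfsRecList graph b (dfsRecList graph a v path).val.1 (dfsRecList graph a v path).val.2).val := by
  induction a with
  | nil => intro b v path; rw [List.nil_append, recList_nil]
  | cons nb rest ih =>
    intro b v path
    by_cases hnb : nb ∈ v
    · rw [List.cons_append, recList_cons_of_mem graph _ _ hnb, recList_cons_of_mem graph _ _ hnb]
      exact ih b v path
    · rw [List.cons_append, recList_cons_of_not_mem graph _ _ hnb,
        recList_cons_of_not_mem graph _ _ hnb]
      exact ih b _ _

-- dropping already-visited elements from the worklist does not change the run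
theorem recList_filter (graph : List (String × List String)) (l : List String) :
    ∀ (w v : List String) (path : List Char), (∀ x, x ∈ w → x ∈ v) →
    (dfsRecList graph (l.filter (fun nb => decide (nb ∉ w))) v path).val =
      (dfsRecList graph l v path).val := by
  induction l with
  | nil => intro w v path _; rw [List.filter_nil]
  | cons nb rest ih =>
    intro w v path hw
    by_cases hnbw : nb ∈ w
    · rw [List.filter_cons_of_neg (by simp [hnbw]), recList_cons_of_mem graph _ _ (hw nb hnbw)]
      exact ih w v path hw
    · rw [List.filter_cons_of_pos (by simp [hnbw])]
      by_cases hnbv : nb ∈ v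
      · rw [recList_cons_of_mem graph _ _ hnbv, recList_cons_of_mem graph _ _ hnbv]
        exact ih w v path hw
      · rw [recList_cons_of_not_mem graph _ _ hnbv, recList_cons_of_not_mem graph _ _ hnbv]
        exact ih w _ _ (fun x hx => (dfsRec graph nb v path hnbv).property.1 x (hw x hx))

-- A's stack loop computes exactly B's recursive worklist run
theorem loop_eq_recList (graph : List (String × List String)) (stack : List String)
    (v : List String) (path : List Char) :
    dfsLoop graph stack v path = (dfsRecList graph stack v path).val := by
  induction stack, v, path using dfsLoop.induct graph with
  | case1 v path => rw [dfsLoop, recList_nil]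
  | case2 v path cur rest h ih =>
    rw [dfsLoop, dif_pos h, ih, recList_cons_of_mem graph _ _ h]
  | case3 v path cur rest h v' ih =>
    rw [dfsLoop, dif_neg h, ih, recList_append,
      recList_filter graph _ (PySem.Set.add v cur) (PySem.Set.add v cur) _ (fun _ hx => hx),
      recList_cons_of_not_mem graph _ _ h, rec_val]

-- ===== VERDICT (by name: the statement is the Claim_ definition above) =====
theorem dfs_spec : Claim_equal_dfs := by
  intro graph start_node visited _
  unfold Spec_dfs dfs dfs_alt
  by_cases h : start_node ∈ visited
  · have hloop : dfsLoop graph [start_node] visited [] = (visited, []) := by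
      rw [dfsLoop, dif_pos h, dfsLoop]
    simp [hloop, h]
  · have hmain : dfsLoop graph [start_node] visited [] = (dfsRec graph start_node visited [] h).val := by
      rw [loop_eq_recList, recList_cons_of_not_mem graph _ _ h, recList_nil]
    have hne : (dfsRec graph start_node visited [] h).val.2 ≠ [] := by
      obtain ⟨t, ht⟩ := (dfsRec graph start_node visited [] h).property.2
      rw [ht]
      simp
    simp [hmain, h, hne]
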